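-- pv_equiv track=rewrite | github.com/kuznetsovvj/education | algorithms/codeforces/1841c.py | calc
-- ===== SOURCE A (Python) =====
-- def calc(w):
--     s = {"A":1, "B":10, "C":100, "D":1000, "E":10000}
--     res = 0
--     current = ord("A") - 1
--     for i in range(len(w)-1,-1,-1):
--         if ord(w[i]) >= current:
--             res += s[w[i]]
--             current = ord(w[i])
--         else:
--             res -= s[w[i]]
--     return res
-- ===== SOURCE B (Python) =====
-- def calc(w):
--     s = {"A": 1, "B": 10, "C": 100, "D": 1000, "E": 10000}
--     vals = [s[c] for c in w]
--     # suffix_max[i] = max value among vals[i:], with 0 past the end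
--     suffix_max = [0] * (len(vals) + 1)
--     for i in range(len(vals) - 1, -1, -1):
--         suffix_max[i] = max(vals[i], suffix_max[i + 1])
--     return sum(v if v >= suffix_max[i + 1] else -v for i, v in enumerate(vals))
-- ===== Notes on version B (the rewrite author's own statement) =====
-- stated objective: alternative
-- what changed: Replaces the right-to-left loop carrying a running max of character codes with a precomputed suffix-maximum table over the character VALUES plus a forward signed-sum pass.
import Mathlib
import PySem

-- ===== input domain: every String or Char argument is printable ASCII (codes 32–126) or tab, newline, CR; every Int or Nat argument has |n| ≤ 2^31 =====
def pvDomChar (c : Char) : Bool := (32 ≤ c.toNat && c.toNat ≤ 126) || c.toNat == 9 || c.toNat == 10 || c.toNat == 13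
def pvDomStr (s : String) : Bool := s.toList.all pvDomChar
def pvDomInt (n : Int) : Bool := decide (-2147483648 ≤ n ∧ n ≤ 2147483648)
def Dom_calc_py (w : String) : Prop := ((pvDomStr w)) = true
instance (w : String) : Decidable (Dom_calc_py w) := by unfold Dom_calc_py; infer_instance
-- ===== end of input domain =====

-- B replaces A's right-to-left running-max-of-char-codes loop by a suffix-maximum
-- table over the character values plus a forward signed-sum pass (alternative, same cost).


-- ===== PORT A =====
-- the dict s = {"A":1, "B":10, "C":100, "D":1000, "E":10000}
def calcDictA : PySem.Dict Char Int :=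
  PySem.Dict.ofList [('A', 1), ('B', 10), ('C', 100), ('D', 1000), ('E', 10000)]

-- literal port of A: for i in range(len(w)-1,-1,-1) carrying (res, current);
-- s[w[i]] raises KeyError outside "ABCDE" (excluded by Pre_), ported as getD _ 0.
def calc_py (w : String) : Int :=
  let cs := w.toList
  let st :=
    (PySem.List.pyRange ((cs.length : Int) - 1) (-1) (-1)).foldl
      (fun (st : Int × Int) i =>
        let c := PySem.List.pyGetD cs i 'A'
        if (c.toNat : Int) ≥ st.2 then
          (st.1 + PySem.Dict.getD calcDictA c 0, (c.toNat : Int))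
        else
          (st.1 - PySem.Dict.getD calcDictA c 0, st.2))
      (0, (('A'.toNat : Int) - 1))
  st.1

-- ===== PORT B =====
def calcDictB : PySem.Dict Char Int :=
  PySem.Dict.ofList [('A', 1), ('B', 10), ('C', 100), ('D', 1000), ('E', 10000)]

-- literal port of B: vals = [s[c] for c in w]; suffix_max built from the right
-- (trailing sentinel 0); then a forward pass adds v when v >= suffix_max[i+1], else subtracts.
def calc_py_alt (w : String) : Int :=
  let vals := w.toList.map (fun c => PySem.Dict.getD calcDictB c 0)
  let suffixMax := vals.foldr (fun v acc => (max v (acc.headD 0)) :: acc) [0]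
  (vals.zip suffixMax.tail).foldl
    (fun r (p : Int × Int) => if p.1 ≥ p.2 then r + p.1 else r - p.1) 0

-- ===== PRECONDITION & SPEC =====
-- Pre_ excludes exactly the strings containing a character outside "ABCDE",
-- on which A raises KeyError.
def Pre_calc_py (w : String) : Prop :=
  (w.toList.all (fun c => c ∈ (['A', 'B', 'C', 'D', 'E'] : List Char))) = true
instance (w : String) : Decidable (Pre_calc_py w) := by unfold Pre_calc_py; infer_instance
def pvWitness_calc_py : String := "DCCE"

def Spec_calc_py (w : String) (out : Int) : Prop := out = calc_py_alt w
instance (w : String) (out : Int) : Decidable (Spec_calc_py w out) := by unfold Spec_calc_py; infer_instance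

-- ===== CLAIM (what is proved, stated in full; the proofs are below) =====
def Claim_equal_calc_py : Prop := ∀ (w : String), Dom_calc_py w → Pre_calc_py w → Spec_calc_py w (calc_py w)

-- ===== LEMMAS AND PROOFS =====

-- value of a character (defensive 0 default, as in the ports)
def pvVal (c : Char) : Int := PySem.Dict.getD calcDictA c 0
-- max of character codes over a suffix, seeded with ord('A') - 1
def pvMO (cs : List Char) : Int := cs.foldr (fun c m => max ((c.toNat : Int)) m) (('A'.toNat : Int) - 1)
-- max of values over a suffix, seeded with 0
def pvMV (cs : List Char) : Int := cs.foldr (fun c m => max (pvVal c) m) 0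

def pvStepA (st : Int × Int) (c : Char) : Int × Int :=
  if (c.toNat : Int) ≥ st.2 then (st.1 + pvVal c, (c.toNat : Int)) else (st.1 - pvVal c, st.2)

lemma calcDictB_eq : calcDictB = calcDictA := rfl

-- the countdown index loop of A is the foldr of pvStepA over the characters
lemma pvFoldrIdx (cs : List Char) (st0 : Int × Int) :
    List.foldr (fun (k : Nat) st => pvStepA st (PySem.List.pyGetD cs ((k : Nat) : Int) 'A')) st0
      (List.range cs.length)
      = cs.foldr (fun c st => pvStepA st c) st0 := by
  induction cs generalizing st0 with
  | nil => simp
  | cons c r ih =>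
    simp only [List.length_cons, List.range_succ_eq_map, List.foldr_cons, List.foldr_map]
    have h : (fun (k : Nat) st => pvStepA st (PySem.List.pyGetD (c :: r) ((k.succ : Nat) : Int) 'A'))
        = (fun (k : Nat) st => pvStepA st (PySem.List.pyGetD r ((k : Nat) : Int) 'A')) := by
      funext k st
      have hc : ((k.succ : Nat) : Int) = (k : Int) + 1 := by omega
      rw [hc]
      simp [PySem.List.pyGetD, PySem.List.pyGet?_cons_succ]
    rw [h, ih]
    have h0 : PySem.List.pyGetD (c :: r) ((0 : Nat) : Int) 'A' = c := by
      simp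
    rw [h0]

lemma calc_py_eq_foldr (w : String) :
    calc_py w = (w.toList.foldr (fun c st => pvStepA st c) (0, (('A'.toNat : Int) - 1))).1 := by
  simp only [calc_py]
  rw [PySem.List.pyRange_neg_one_eq_reverse, List.foldl_reverse]
  have h : ((-1 : Int) + 1) = 0 := by norm_num
  have h2 : ((w.toList.length : Int) - 1 + 1) = (w.toList.length : Int) := by ring
  rw [h, h2, PySem.List.pyRange_one]
  simp only [Int.sub_zero, Int.toNat_natCast, List.foldr_map, zero_add]
  rw [← pvFoldrIdx w.toList (0, (('A'.toNat : Int) - 1))]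
  rfl

-- A's loop state: .1 is the signed sum pvS, .2 is the suffix code-max pvMO
def pvS : List Char → Int
  | [] => 0
  | c :: r => (if (c.toNat : Int) ≥ pvMO r then pvVal c else -pvVal c) + pvS r

-- B's reference signed sum: sign decided by comparing values with the suffix value-max
def pvS' : List Char → Int
  | [] => 0
  | c :: r => (if pvVal c ≥ pvMV r then pvVal c else -pvVal c) + pvS' r

lemma pvFoldrA (cs : List Char) :
    cs.foldr (fun c st => pvStepA st c) (0, (('A'.toNat : Int) - 1)) = (pvS cs, pvMO cs) := by
  induction cs with
  | nil => rfl
  | cons c r ih =>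
    rw [List.foldr_cons, ih]
    show pvStepA (pvS r, pvMO r) c = (pvS (c :: r), pvMO (c :: r))
    have hmo : pvMO (c :: r) = max ((c.toNat : Int)) (pvMO r) := rfl
    rw [pvStepA, pvS, hmo]
    split_ifs with h
    · simp only [Prod.mk.injEq]
      exact ⟨by ring, by omega⟩
    · simp only [Prod.mk.injEq]
      exact ⟨by ring, by omega⟩

-- the suffix-max list of B
def pvSM (vs : List Int) : List Int := vs.foldr (fun v acc => (max v (acc.headD 0)) :: acc) [0]

lemma pvSM_cons (v : Int) (vr : List Int) :
    pvSM (v :: vr) = (max v ((pvSM vr).headD 0)) :: pvSM vr := rfl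

lemma pvSM_ne_nil (vs : List Int) : pvSM vs ≠ [] := by
  cases vs <;> simp [pvSM]

lemma pvSM_headD (vs : List Int) : (pvSM vs).headD 0 = vs.foldr max 0 := by
  induction vs with
  | nil => rfl
  | cons v vr ih => rw [pvSM_cons]; simp only [List.headD_cons, List.foldr_cons, ih]

lemma pvMV_foldr_map (cs : List Char) : (cs.map pvVal).foldr max 0 = pvMV cs := by
  rw [List.foldr_map]; rfl

lemma pvB_fold (cs : List Char) (a : Int) :
    ((cs.map pvVal).zip (pvSM (cs.map pvVal)).tail).foldl
      (fun r (p : Int × Int) => if p.1 ≥ p.2 then r + p.1 else r - p.1) a = a + pvS' cs := by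
  induction cs generalizing a with
  | nil => simp [pvSM, pvS']
  | cons c r ih =>
    obtain ⟨x, t, hx⟩ : ∃ x t, pvSM (r.map pvVal) = x :: t := by
      cases h : pvSM (r.map pvVal) with
      | nil => exact absurd h (pvSM_ne_nil _)
      | cons x t => exact ⟨x, t, rfl⟩
    have hxval : x = pvMV r := by
      have := pvSM_headD (r.map pvVal)
      rw [hx] at this
      simpa [pvMV_foldr_map] using this
    simp only [List.map_cons, pvSM_cons, List.tail_cons, hx, List.zip_cons_cons, List.foldl_cons]
    have ht : t = (pvSM (r.map pvVal)).tail := by rw [hx]; rfl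
    rw [ht, ih, pvS', hxval]
    split_ifs with h <;> ring

-- pairwise: code order agrees with value order on "ABCDE"
lemma pvPair (c d : Char) (hc : c ∈ (['A','B','C','D','E'] : List Char))
    (hd : d ∈ (['A','B','C','D','E'] : List Char)) :
    ((c.toNat : Int) ≥ (d.toNat : Int) ↔ pvVal c ≥ pvVal d) := by
  fin_cases hc <;> fin_cases hd <;> decide

lemma pvVal_nonneg (c : Char) (hc : c ∈ (['A','B','C','D','E'] : List Char)) : 0 ≤ pvVal c := by
  fin_cases hc <;> decide

lemma pvOrd_big (c : Char) (hc : c ∈ (['A','B','C','D','E'] : List Char)) :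
    ('A'.toNat : Int) - 1 ≤ (c.toNat : Int) := by
  fin_cases hc <;> decide

lemma pvCond (c : Char) (r : List Char) (hc : c ∈ (['A','B','C','D','E'] : List Char))
    (hr : ∀ d ∈ r, d ∈ (['A','B','C','D','E'] : List Char)) :
    ((c.toNat : Int) ≥ pvMO r ↔ pvVal c ≥ pvMV r) := by
  induction r with
  | nil =>
    simp only [pvMO, pvMV, List.foldr_nil]
    constructor
    · intro _; exact pvVal_nonneg c hc
    · intro _; exact pvOrd_big c hc
  | cons d r' ih =>
    have hmo : pvMO (d :: r') = max ((d.toNat : Int)) (pvMO r') := rfl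
    have hmv : pvMV (d :: r') = max (pvVal d) (pvMV r') := rfl
    rw [hmo, hmv, ge_iff_le, max_le_iff, ge_iff_le, max_le_iff]
    have hd := hr d (List.mem_cons_self)
    have hr' : ∀ e ∈ r', e ∈ (['A','B','C','D','E'] : List Char) := fun e he => hr e (List.mem_cons_of_mem _ he)
    constructor
    · rintro ⟨h1, h2⟩
      exact ⟨(pvPair c d hc hd).mp h1, (ih hr').mp h2⟩
    · rintro ⟨h1, h2⟩
      exact ⟨(pvPair c d hc hd).mpr h1, (ih hr').mpr h2⟩

lemma pvS_eq_pvS' (cs : List Char) (h : ∀ c ∈ cs, c ∈ (['A','B','C','D','E'] : List Char)) :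
    pvS cs = pvS' cs := by
  induction cs with
  | nil => rfl
  | cons c r ih =>
    have hc := h c (List.mem_cons_self)
    have hr : ∀ d ∈ r, d ∈ (['A','B','C','D','E'] : List Char) := fun d hd => h d (List.mem_cons_of_mem _ hd)
    rw [pvS, pvS', ih hr]
    by_cases hcond : (c.toNat : Int) ≥ pvMO r
    · rw [if_pos hcond, if_pos ((pvCond c r hc hr).mp hcond)]
    · rw [if_neg hcond, if_neg (fun hv => hcond ((pvCond c r hc hr).mpr hv))]

lemma calc_py_alt_eq (w : String) : calc_py_alt w = pvS' w.toList := by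
  simp only [calc_py_alt, calcDictB_eq]
  have hmap : (fun c => PySem.Dict.getD calcDictA c 0) = pvVal := by funext c; rfl
  rw [hmap]
  have := pvB_fold w.toList 0
  simp only [pvSM] at this
  rw [this]
  ring

-- ===== VERDICT (by name: the statement is the Claim_ definition above) =====
theorem calc_py_spec : Claim_equal_calc_py := by
  intro w _ hpre
  unfold Pre_calc_py at hpre
  simp only [List.all_eq_true, decide_eq_true_eq] at hpre
  unfold Spec_calc_py
  rw [calc_py_eq_foldr, pvFoldrA, calc_py_alt_eq]
  exact pvS_eq_pvS' w.toList hpre
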